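-- pv_equiv track=rewrite | github.com/JacobKingsley/RoboticsFinalProject | path_functions.py | get_grid_movements
-- ===== SOURCE A (Python) =====
-- def get_grid_movements(grid_path):
--
-- 	curr_d = find_direction(grid_path[0][0], grid_path[0][1], grid_path[1][0], grid_path[1][1])
--
-- 	curr_x = grid_path[1][0]
-- 	curr_y = grid_path[1][1]
--
--
-- 	movements_list = []
--
-- 	curr_movement_l = 1
--
--
-- 	# if abs((path[0] - x)) < path
-- 	for point in grid_path[2:]:
--
-- 		new_d = find_direction(curr_x, curr_y, point[0], point[1])
--
-- 		if new_d == curr_d: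
-- 			if new_d == 'x':
-- 				curr_movement_l += (point[0] - curr_x)
-- 			elif new_d == 'y':
-- 				curr_movement_l += (point[1] - curr_y)
--
-- 		else:
-- 			movements_list.append((curr_d, curr_movement_l))
-- 			curr_d = new_d
-- 			curr_movement_l = 1
--
--
-- 		curr_x = point[0]
-- 		curr_y = point[1]
--
-- 	# add last movement to list
-- 	movements_list.append((curr_d, curr_movement_l))
--
-- 	return movements_list
--
-- def find_direction(start_x, start_y, end_x, end_y):
-- 	if abs(end_x - start_x) >= 1:
-- 		return 'x'
-- 	elif abs(end_y - start_y) >= 1: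
-- 		return 'y'
-- ===== SOURCE B (Python) =====
-- def get_grid_movements(grid_path):
--     segs = [(_pv_dir(p, q), _pv_delta(p, q)) for p, q in zip(grid_path, grid_path[1:])]
--     return _pv_runs(segs)
--
-- def _pv_dir(p, q):
--     if abs(q[0] - p[0]) >= 1:
--         return 'x'
--     if abs(q[1] - p[1]) >= 1:
--         return 'y'
--     return None
--
-- def _pv_delta(p, q):
--     d = _pv_dir(p, q)
--     if d == 'x':
--         return q[0] - p[0]
--     if d == 'y':
--         return q[1] - p[1]
--     return 0
--
-- def _pv_runs(segs):
--     if not segs: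
--         return []
--     d = segs[0][0]
--     i = 1
--     while i < len(segs) and segs[i][0] == d:
--         i += 1
--     return [(d, 1 + sum(delta for _, delta in segs[1:i]))] + _pv_runs(segs[i:])
-- ===== Notes on version B (the rewrite author's own statement) =====
-- stated objective: alternative
-- what changed: A's single stateful accumulator loop (current direction, running length, partial output) is replaced by a two-phase decomposition: first build the list of per-consecutive-pair (direction, signed delta) descriptors, then recursively split it into maximal equal-direction runs, emitting 1 + sum of each run's non-first deltas.
-- outside the precondition, e.g. on get_grid_movements([(0, 0), (0, 0)]): A returns [(None, 1)], B returns [(None, 1)]; on get_grid_movements([]): A raises IndexError, B returns []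
-- crash fix: On paths of length < 2 A raises IndexError (grid_path[1]); B returns []. — e.g. on get_grid_movements([(1, 1)]): A raises IndexError, B returns []
import Mathlib
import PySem

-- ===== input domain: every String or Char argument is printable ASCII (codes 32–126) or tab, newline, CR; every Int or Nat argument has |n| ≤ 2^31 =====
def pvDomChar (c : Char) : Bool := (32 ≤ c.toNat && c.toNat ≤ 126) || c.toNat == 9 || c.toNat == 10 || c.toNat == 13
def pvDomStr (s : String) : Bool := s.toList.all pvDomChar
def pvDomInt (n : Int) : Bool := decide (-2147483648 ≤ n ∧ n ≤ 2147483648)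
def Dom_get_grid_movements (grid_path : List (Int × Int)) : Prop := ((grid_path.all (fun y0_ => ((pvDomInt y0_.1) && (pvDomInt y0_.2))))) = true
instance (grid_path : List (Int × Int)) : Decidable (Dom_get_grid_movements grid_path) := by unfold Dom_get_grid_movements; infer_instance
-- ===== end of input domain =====

-- B re-decomposes A's stateful accumulator loop into two phases (per-pair segment
-- descriptors, then recursive run splitting); objective: alternative decomposition, same cost.

-- ===== PORT A =====
-- find_direction: returns none where the Python returns None (both deltas zero)
def pvFindDirection (start_x start_y end_x end_y : Int) : Option String :=
  if 1 ≤ (end_x - start_x).natAbs then some "x"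
  else if 1 ≤ (end_y - start_y).natAbs then some "y"
  else none

-- A's loop state: (curr_d, curr_x, curr_y, curr_movement_l, movements_list).
-- A Python None direction is appended as "" (unreachable inside Pre_, where all directions exist).
def pvStepA (s : Option String × Int × Int × Int × List (String × Int)) (point : Int × Int) :
    Option String × Int × Int × Int × List (String × Int) :=
  let (curr_d, curr_x, curr_y, curr_l, acc) := s
  let new_d := pvFindDirection curr_x curr_y point.1 point.2
  if new_d = curr_d then
    let curr_l' :=
      if new_d = some "x" then curr_l + (point.1 - curr_x)
      else if new_d = some "y" then curr_l + (point.2 - curr_y)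
      else curr_l
    (curr_d, point.1, point.2, curr_l', acc)
  else
    (new_d, point.1, point.2, 1, acc ++ [(curr_d.getD "", curr_l)])

def get_grid_movements (grid_path : List (Int × Int)) : List (String × Int) :=
  match grid_path with
  | p0 :: p1 :: rest =>
    let s := rest.foldl pvStepA
      (pvFindDirection p0.1 p0.2 p1.1 p1.2, p1.1, p1.2, 1, [])
    s.2.2.2.2 ++ [(s.1.getD "", s.2.2.2.1)]
  | _ => []  -- Python raises IndexError here (outside Pre_)

-- ===== PORT B =====
def pvDirB (p q : Int × Int) : Option String :=
  if 1 ≤ (q.1 - p.1).natAbs then some "x"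
  else if 1 ≤ (q.2 - p.2).natAbs then some "y"
  else none

def pvDeltaB (p q : Int × Int) : Int :=
  if pvDirB p q = some "x" then q.1 - p.1
  else if pvDirB p q = some "y" then q.2 - p.2
  else 0

def pvSegs (path : List (Int × Int)) : List (Option String × Int) :=
  List.zipWith (fun p q => (pvDirB p q, pvDeltaB p q)) path path.tail

-- _pv_runs: the index-scan while loop is the takeWhile/dropWhile split of the tail
def pvRuns : List (Option String × Int) → List (String × Int)
  | [] => []
  | (d, _) :: rest =>
    (d.getD "", 1 + ((rest.takeWhile (fun s => s.1 == d)).map Prod.snd).sum)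
      :: pvRuns (rest.dropWhile (fun s => s.1 == d))
termination_by segs => segs.length
decreasing_by
  simp only [List.length_cons]
  exact Nat.lt_succ_of_le (List.length_dropWhile_le _ _)

def get_grid_movements_alt (grid_path : List (Int × Int)) : List (String × Int) :=
  pvRuns (pvSegs grid_path)

-- ===== PRECONDITION & SPEC =====
-- Pre_ excludes paths of length < 2, on which A raises IndexError, and paths with two
-- equal consecutive points, on which A's output contains None, not a value of type str.
def Pre_get_grid_movements (grid_path : List (Int × Int)) : Prop :=
  2 ≤ grid_path.length ∧ ∀ pq ∈ grid_path.zip grid_path.tail, pq.1 ≠ pq.2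
instance (grid_path : List (Int × Int)) : Decidable (Pre_get_grid_movements grid_path) := by
  unfold Pre_get_grid_movements; infer_instance

def pvWitness_get_grid_movements : (List (Int × Int)) := [(0, 0), (1, 0), (2, 0), (2, 3)]

-- A raises IndexError on paths of length < 2; B returns the empty movement list there.
def Raises_get_grid_movements (grid_path : List (Int × Int)) : Prop := grid_path.length < 2
instance (grid_path : List (Int × Int)) : Decidable (Raises_get_grid_movements grid_path) := by
  unfold Raises_get_grid_movements; infer_instance
def pvRaiseWitness_get_grid_movements : (List (Int × Int)) := [(1, 1)]
def pvRaiseWitnessOut_get_grid_movements : List (String × Int) := []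

def Spec_get_grid_movements (grid_path : List (Int × Int)) (out : List (String × Int)) : Prop :=
  out = get_grid_movements_alt grid_path
instance (grid_path : List (Int × Int)) (out : List (String × Int)) :
    Decidable (Spec_get_grid_movements grid_path out) := by
  unfold Spec_get_grid_movements; infer_instance

-- ===== CLAIM (what is proved, stated in full; the proofs are below) =====
def Claim_equal_get_grid_movements : Prop :=
  ∀ (grid_path : List (Int × Int)), Dom_get_grid_movements grid_path →
    Pre_get_grid_movements grid_path →
    Spec_get_grid_movements grid_path (get_grid_movements grid_path)

def Claim_raises_get_grid_movements : Prop :=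
  (∀ (grid_path : List (Int × Int)), Dom_get_grid_movements grid_path →
      Raises_get_grid_movements grid_path → ¬ Pre_get_grid_movements grid_path) ∧
  (Dom_get_grid_movements (pvRaiseWitness_get_grid_movements) ∧
    Raises_get_grid_movements (pvRaiseWitness_get_grid_movements) ∧
    get_grid_movements_alt (pvRaiseWitness_get_grid_movements) = pvRaiseWitnessOut_get_grid_movements)

-- ===== LEMMAS AND PROOFS =====

-- "continue current run": direction d, accumulated length l, remaining segments
def pvRunsFrom (d : Option String) (l : Int) : List (Option String × Int) → List (String × Int)
  | [] => [(d.getD "", l)]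
  | (d', δ) :: rest =>
    if d' = d then pvRunsFrom d (l + δ) rest
    else (d.getD "", l) :: pvRunsFrom d' 1 rest

theorem pvRunsFrom_eq (rest : List (Option String × Int)) :
    ∀ (d : Option String) (l : Int),
      pvRunsFrom d l rest =
        (d.getD "", l + ((rest.takeWhile (fun s => s.1 == d)).map Prod.snd).sum)
          :: pvRuns (rest.dropWhile (fun s => s.1 == d)) := by
  induction rest with
  | nil => intro d l; simp [pvRunsFrom, pvRuns]
  | cons hd t ih =>
    intro d l
    obtain ⟨d', δ⟩ := hd
    by_cases h : d' = d
    · simp only [pvRunsFrom, if_pos h, List.takeWhile, List.dropWhile, h, beq_self_eq_true]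
      rw [ih]
      simp [add_assoc]
    · have hb : ((d', δ).1 == d) = false := by simp [h]
      simp only [pvRunsFrom, if_neg h, List.takeWhile, List.dropWhile, hb]
      simp only [pvRuns]
      rw [ih d' 1]
      simp

theorem pvRuns_cons (d : Option String) (δ : Int) (rest : List (Option String × Int)) :
    pvRuns ((d, δ) :: rest) = pvRunsFrom d 1 rest := by
  rw [pvRuns.eq_def, pvRunsFrom_eq]

theorem pvDirB_eq (p q : Int × Int) :
    pvDirB p q = pvFindDirection p.1 p.2 q.1 q.2 := rfl

-- the main loop invariant: A's fold from state (d, prev, l, acc) yields acc ++ runsFrom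
theorem foldA_eq (rest : List (Int × Int)) :
    ∀ (x y : Int) (d : Option String) (l : Int) (acc : List (String × Int)),
      (let s := rest.foldl pvStepA (d, x, y, l, acc);
        s.2.2.2.2 ++ [(s.1.getD "", s.2.2.2.1)]) =
      acc ++ pvRunsFrom d l (pvSegs ((x, y) :: rest)) := by
  induction rest with
  | nil => intro x y d l acc; simp [pvSegs, pvRunsFrom]
  | cons point t ih =>
    intro x y d l acc
    have hseg : pvSegs ((x, y) :: point :: t)
        = (pvDirB (x, y) point, pvDeltaB (x, y) point) :: pvSegs (point :: t) := rfl
    rw [hseg]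
    simp only [List.foldl_cons]
    by_cases h : pvFindDirection x y point.1 point.2 = d
    · have hstep : pvStepA (d, x, y, l, acc) point
          = (d, point.1, point.2, l + pvDeltaB (x, y) point, acc) := by
        simp only [pvStepA, if_pos h]
        by_cases hx : pvFindDirection x y point.1 point.2 = some "x"
        · simp_all [pvDeltaB, pvDirB_eq]
        · by_cases hy : pvFindDirection x y point.1 point.2 = some "y"
          · simp_all [pvDeltaB, pvDirB_eq]
          · simp_all [pvDeltaB, pvDirB_eq]
      rw [hstep, ih]
      have : pvDirB (x, y) point = d := by rw [pvDirB_eq]; exact h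
      simp [pvRunsFrom, this]
    · have hstep : pvStepA (d, x, y, l, acc)  point
          = (pvFindDirection x y point.1 point.2, point.1, point.2, 1,
              acc ++ [(d.getD "", l)]) := by
        simp only [pvStepA, if_neg h]
      rw [hstep, ih]
      have : pvDirB (x, y) point = pvFindDirection x y point.1 point.2 := pvDirB_eq _ _
      simp [pvRunsFrom, this, h]

-- ports agree on every path (len < 2 cases both give [])
theorem ports_eq (grid_path : List (Int × Int)) :
    get_grid_movements grid_path = get_grid_movements_alt grid_path := by
  match grid_path with
  | [] => simp [get_grid_movements, get_grid_movements_alt, pvSegs, pvRuns]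
  | [_] => simp [get_grid_movements, get_grid_movements_alt, pvSegs, pvRuns]
  | p0 :: p1 :: rest =>
    have hA : get_grid_movements (p0 :: p1 :: rest)
        = [] ++ pvRunsFrom (pvFindDirection p0.1 p0.2 p1.1 p1.2) 1
            (pvSegs ((p1.1, p1.2) :: rest)) := by
      rw [← foldA_eq rest p1.1 p1.2 _ 1 []]
      rfl
    rw [hA]
    have hseg : pvSegs (p0 :: p1 :: rest)
        = (pvDirB p0 p1, pvDeltaB p0 p1) :: pvSegs (p1 :: rest) := by
      cases p1; rfl
    show [] ++ _ = pvRuns (pvSegs (p0 :: p1 :: rest))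
    rw [hseg, pvRuns_cons, pvDirB_eq]
    simp

-- ===== VERDICT (by name: the statement is the Claim_ definition above) =====
theorem get_grid_movements_spec : Claim_equal_get_grid_movements := by
  intro grid_path _ _
  unfold Spec_get_grid_movements
  exact ports_eq grid_path

@[simp] theorem get_grid_movements_raises : Claim_raises_get_grid_movements := by
  unfold Claim_raises_get_grid_movements
  constructor
  · intro grid_path _ hr hp
    unfold Raises_get_grid_movements at hr
    have := hp.1
    omega
  · refine ⟨by decide, by decide, ?_⟩
    show pvRuns (pvSegs [(1, 1)]) = pvRaiseWitnessOut_get_grid_movements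
    simp [pvSegs, pvRuns, pvRaiseWitnessOut_get_grid_movements]
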